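-- pv_equiv track=rewrite | github.com/vonpetersenn/Pleco-to-Anki | pleco/definition_helpers.py | supress_cross_references
-- ===== SOURCE A (Python) =====
-- def supress_cross_references(long_string):
--
--     # Split the string into parts using 'See ' as a delimiter
--     parts = long_string.split(' See ')
--
--     if len(parts) == 1:
--         return long_string
--
--     new_string = parts[0]
--
--     for string in parts[1:]:
--         sub_parts = string.split(' ')
--         if len(sub_parts) > 1:
--             sub_parts = sub_parts[1:]
--             new_string += ' ' + ' '.join(sub_parts)
--
--     return new_string
-- ===== SOURCE B (Python) =====
-- import re
--
-- def supress_cross_references(long_string):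
--     # One-pass regex substitution: delete each ' See ' delimiter together with
--     # the following maximal run of non-space characters (the first word of the
--     # part, possibly empty), matching str.split(' ') first-token semantics.
--     return re.sub(r' See [^ ]*', '', long_string)
-- ===== Notes on version B (the rewrite author's own statement) =====
-- stated objective: idiomatic
-- what changed: Replaced the split-on-delimiter / re-split-each-part / rebuild-with-a-loop pipeline by a single regular-expression substitution (re.sub) that scans the string once and deletes each See-delimiter together with the following maximal, possibly empty, run of non-space characters.
import Mathlib
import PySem

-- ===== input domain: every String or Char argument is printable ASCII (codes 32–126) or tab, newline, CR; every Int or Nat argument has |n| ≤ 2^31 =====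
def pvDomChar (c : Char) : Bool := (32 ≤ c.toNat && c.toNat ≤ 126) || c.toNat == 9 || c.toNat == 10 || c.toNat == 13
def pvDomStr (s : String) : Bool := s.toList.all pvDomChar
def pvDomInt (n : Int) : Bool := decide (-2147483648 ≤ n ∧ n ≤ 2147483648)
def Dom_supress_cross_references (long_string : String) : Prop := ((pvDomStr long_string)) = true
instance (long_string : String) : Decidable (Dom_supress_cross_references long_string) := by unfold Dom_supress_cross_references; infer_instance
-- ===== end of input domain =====

-- B replaces A's split-and-rebuild pipeline by a single left-to-right scan (re.sub of ' See [^ ]*'): idiomatic one-pass deletion, same O(n) cost.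

-- the ' See ' delimiter as a character-list literal (shared literal constant)
def pvSeeSep : List Char := [' ', 'S', 'e', 'e', ' ']

-- ===== PORT A =====
def supress_cross_references (long_string : String) : String :=
  -- parts = long_string.split(' See ')
  let parts := PySem.Chars.splitOn long_string.toList pvSeeSep
  if parts.length = 1 then long_string
  else
    -- new_string = parts[0]; for string in parts[1:]: …
    String.ofList
      ((parts.drop 1).foldl
        (fun new_string s =>
          let sub_parts := PySem.Chars.splitOn s [' ']
          if 1 < sub_parts.length then
            new_string ++ [' '] ++ PySem.Chars.join [' '] (sub_parts.drop 1)
          else new_string)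
        (parts.headD []))

-- ===== PORT B =====
-- Hand port of Source B's re.sub(r' See [^ ]*', '', s) for this FIXED pattern, exact by re semantics:
-- leftmost non-overlapping matches, each = the literal ' See ' followed by the greedy maximal run of
-- non-space characters; on a match the scan resumes right after the match, otherwise the char is kept.
def pvScan : List Char → List Char
  | [] => []
  | c :: rest =>
    if pvSeeSep.isPrefixOf (c :: rest) then
      pvScan ((rest.drop 4).dropWhile (fun d => d ≠ ' '))
    else c :: pvScan rest
termination_by l => l.length
decreasing_by
  · have h1 := List.length_dropWhile_le (fun d => decide (d ≠ ' ')) (rest.drop 4)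
    have h2 := List.length_drop (l := rest) (i := 4)
    simp at *; omega
  · simp

def supress_cross_references_alt (long_string : String) : String :=
  String.ofList (pvScan long_string.toList)

-- ===== PRECONDITION & SPEC =====
def Spec_supress_cross_references (long_string : String) (out : String) : Prop := out = supress_cross_references_alt long_string
instance (long_string : String) (out : String) : Decidable (Spec_supress_cross_references long_string out) := by unfold Spec_supress_cross_references; infer_instance

-- ===== CLAIM (what is proved, stated in full; the proofs are below) =====
def Claim_equal_supress_cross_references : Prop := ∀ (long_string : String), Dom_supress_cross_references long_string → Spec_supress_cross_references long_string (supress_cross_references long_string)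

-- ===== LEMMAS AND PROOFS =====

-- A fuel-free reformulation of PySem.Chars.splitOn (the accumulator `cur` is the part being built).
-- For sep = [] it is not splitOn (never used there); recursion is on the scanned list's length.
def pvSplit (sep : List Char) : List Char → List Char → List (List Char)
  | cur, [] => [cur]
  | cur, c :: rest =>
    if sep.isPrefixOf (c :: rest) then cur :: pvSplit sep [] (rest.drop (sep.length - 1))
    else pvSplit sep (cur ++ [c]) rest
termination_by _ l => l.length
decreasing_by
  · simp
  · simp

theorem pvSplit_ne_nil (sep cur : List Char) (l : List Char) : pvSplit sep cur l ≠ [] := by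
  induction cur, l using pvSplit.induct sep with
  | case1 cur => simp [pvSplit]
  | case2 cur c rest h ih => simp [pvSplit, h]
  | case3 cur c rest h ih => simpa [pvSplit, h] using ih

theorem pvSplit_cons_ex (sep cur l : List Char) : ∃ q qs, pvSplit sep cur l = q :: qs := by
  cases hq : pvSplit sep cur l with
  | nil => exact absurd hq (pvSplit_ne_nil _ _ _)
  | cons q qs => exact ⟨q, qs, rfl⟩

theorem pvGo_eq_pvSplit (sep : List Char) (hs : sep ≠ []) :
    ∀ (fuel : Nat) (l cur acc : _), l.length < fuel →
      PySem.Chars.splitOn.go sep fuel l cur acc = acc.reverse ++ pvSplit sep cur.reverse l := by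
  intro fuel
  induction fuel with
  | zero => intro l cur acc h; omega
  | succ fuel ih =>
    intro l cur acc h
    obtain ⟨k, hk⟩ : ∃ k, sep.length = k + 1 := by
      cases sep with
      | nil => exact absurd rfl hs
      | cons a t => exact ⟨t.length, rfl⟩
    cases l with
    | nil => simp [PySem.Chars.splitOn.go, pvSplit]
    | cons c rest =>
      by_cases hp : sep.isPrefixOf (c :: rest) = true
      · have hlen : (List.drop sep.length (c :: rest)).length < fuel := by
          simp at h ⊢; omega
        simp only [PySem.Chars.splitOn.go, hp, if_pos]
        rw [ih _ _ _ hlen]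
        simp [pvSplit, hp, hk]
      · simp only [PySem.Chars.splitOn.go, hp, if_neg, Bool.not_eq_true]
        have hlen : rest.length < fuel := by simp at h; omega
        rw [ih _ _ _ hlen]
        simp [pvSplit, hp]

theorem pvSplitOn_eq (sep : List Char) (hs : sep ≠ []) (l : List Char) :
    PySem.Chars.splitOn l sep = pvSplit sep [] l := by
  have := pvGo_eq_pvSplit sep hs (l.length + 1) l [] [] (by omega)
  simpa [PySem.Chars.splitOn] using this

-- the accumulator only prefixes the FIRST part
theorem pvSplit_cur (sep : List Char) (cur0 l : List Char) :
    ∀ cur, pvSplit sep cur l =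
      (cur ++ (pvSplit sep [] l).headD []) :: (pvSplit sep [] l).drop 1 := by
  induction cur0, l using pvSplit.induct sep with
  | case1 _ => intro cur; simp [pvSplit]
  | case2 _ c rest h ih => intro cur; simp [pvSplit, h]
  | case3 _ c rest h ih =>
    intro cur
    simp only [pvSplit, h]
    simp only [Bool.false_eq_true, if_false, List.nil_append]
    rw [ih (cur ++ [c]), ih [c]]
    simp

-- joining the parts with sep restores the input (after the accumulator)
theorem pvJoin_pvSplit (sep : List Char) (hs : sep ≠ []) (cur0 l : List Char) :
    ∀ cur, PySem.Chars.join sep (pvSplit sep cur l) = cur ++ l := by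
  induction cur0, l using pvSplit.induct sep with
  | case1 _ => intro cur; simp [pvSplit, PySem.Chars.join, List.intercalate]
  | case2 _ c rest h ih =>
    intro cur
    obtain ⟨a, s, hsep⟩ : ∃ a s, sep = a :: s := by
      cases sep with
      | nil => exact absurd rfl hs
      | cons a s => exact ⟨a, s, rfl⟩
    obtain ⟨t, ht⟩ := List.isPrefixOf_iff_prefix.mp h
    have hca : c = a := by
      rw [hsep] at ht
      exact (List.cons_eq_cons.mp ht).1.symm
    have hrest : rest = s ++ t := by
      rw [hsep] at ht
      exact (List.cons_eq_cons.mp ht).2.symm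
    have hdrop : rest.drop (sep.length - 1) = t := by
      rw [hrest, hsep]; simp
    simp only [pvSplit, h, if_true]
    rw [hdrop]
    obtain ⟨q, qs, hq⟩ := pvSplit_cons_ex sep [] t
    have ihnil := ih ([] : List Char)
    rw [hdrop] at ihnil
    rw [hq] at ihnil ⊢
    simp only [List.nil_append] at ihnil
    have step : PySem.Chars.join sep (cur :: q :: qs) =
        cur ++ sep ++ PySem.Chars.join sep (q :: qs) := by
      simp [PySem.Chars.join, List.intercalate]
    rw [step, ihnil]
    have hct : c :: rest = sep ++ t := by rw [hsep, hrest, hca]; simp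
    rw [hct]; simp
  | case3 _ c rest h ih =>
    intro cur
    simp only [pvSplit, h]
    simp only [Bool.false_eq_true, if_false]
    rw [ih (cur ++ [c])]
    simp

theorem pvInner (l cur0 : List Char) :
    ∀ cur, (if 1 < (pvSplit [' '] cur l).length then
        ' ' :: PySem.Chars.join [' '] ((pvSplit [' '] cur l).drop 1) else []) =
      l.dropWhile (fun d => d ≠ ' ') := by
  induction cur0, l using pvSplit.induct [' '] with
  | case1 _ => intro cur; simp [pvSplit]
  | case2 _ c rest h ih =>
    intro cur
    have hc : c = ' ' := by
      obtain ⟨t, ht⟩ := List.isPrefixOf_iff_prefix.mp h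
      exact (List.cons_eq_cons.mp ht).1.symm
    obtain ⟨q, qs, hq⟩ := pvSplit_cons_ex [' '] [] rest
    have hjoin := pvJoin_pvSplit [' '] (by simp) [] rest ([] : List Char)
    simp only [List.nil_append] at hjoin
    have hlen : 1 < (pvSplit [' '] [] rest).length + 1 := by
      rw [hq]; simp
    simp only [pvSplit, h, if_true, List.length_cons, List.length_nil,
      Nat.zero_add, Nat.sub_self, List.drop_zero, List.drop_one, List.tail_cons]
    rw [if_pos hlen, hjoin, hc]
    simp
  | case3 _ c rest h ih =>
    intro cur
    have hc : ¬ (c = ' ') := by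
      intro hceq
      rw [hceq] at h
      simp [List.isPrefixOf] at h
    simp only [pvSplit, h]
    simp only [Bool.false_eq_true, if_false]
    rw [pvSplit_cur [' '] [] rest (cur ++ [c])]
    have ih' := ih cur
    rw [pvSplit_cur [' '] [] rest cur] at ih'
    simp only [List.length_cons, List.drop_one, List.tail_cons] at ih' ⊢
    rw [List.dropWhile_cons]
    simpa [hc] using ih'
  -- (the `cur` in the if-condition and drop 1 does not matter, by pvSplit_cur)

theorem pvAbsorb (w : List Char) (hw : ∀ c ∈ w, c ≠ ' ') :
    ∀ (cur t : List Char), pvSplit pvSeeSep cur (w ++ t) = pvSplit pvSeeSep (cur ++ w) t := by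
  induction w with
  | nil => intro cur t; simp
  | cons c w' ih =>
    intro cur t
    have hc : c ≠ ' ' := hw c (by simp)
    have hp : pvSeeSep.isPrefixOf (c :: (w' ++ t)) = false := by
      simp [pvSeeSep, List.isPrefixOf]
      intro hceq; exact absurd hceq.symm hc
    simp only [List.cons_append, pvSplit, hp]
    simp only [Bool.false_eq_true, if_false]
    rw [ih (fun d hd => hw d (by simp [hd])) (cur ++ [c]) t]
    simp

def pvTailFlat (ps : List (List Char)) : List Char :=
  ps.headD [] ++ (ps.drop 1).flatMap (List.dropWhile (fun d => d ≠ ' '))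

-- head of a nonempty dropWhile fails the predicate
theorem pvDropWhile_head_false {p : Char → Bool} {l : List Char} {d : Char} {t' : List Char}
    (h : l.dropWhile p = d :: t') : p d = false := by
  induction l with
  | nil => simp at h
  | cons a l ih =>
    rw [List.dropWhile_cons] at h
    by_cases hpa : p a = true
    · rw [if_pos hpa] at h; exact ih h
    · rw [if_neg hpa] at h
      have : a = d := (List.cons_eq_cons.mp h).1
      rw [← this]; simpa using hpa

-- after a delimiter the scan resumes at the first space: the skipped word w is absorbed
-- into the next part's head, and dropWhile removes exactly it again
theorem pvDw_head (w m' : List Char) (hw : ∀ c ∈ w, ¬ (c = ' '))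
    (hm' : m' = [] ∨ ∃ t', m' = ' ' :: t') :
    List.dropWhile (fun d => d ≠ ' ') (w ++ (pvSplit pvSeeSep [] m').headD []) =
      (pvSplit pvSeeSep [] m').headD [] := by
  have hwnil : List.dropWhile (fun d => decide (d ≠ ' ')) w = [] := by
    rw [List.dropWhile_eq_nil_iff]
    intro x hx; simpa using hw x hx
  rcases hm' with h0 | ⟨t', ht'⟩
  · subst h0
    simp [pvSplit]
    exact hw
  · subst ht'
    by_cases hp : pvSeeSep.isPrefixOf (' ' :: t') = true
    · simp [pvSplit, hp]
      exact hw
    · have hstep : pvSplit pvSeeSep [] (' ' :: t') = pvSplit pvSeeSep [' '] t' := by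
        simp [pvSplit, hp]
      rw [hstep, pvSplit_cur pvSeeSep [] t' [' ']]
      simp [List.dropWhile_append]
      exact fun h' => absurd rfl (hw ' ' h')

theorem pvMain : ∀ (n : Nat) (l : List Char), l.length ≤ n →
    pvTailFlat (pvSplit pvSeeSep [] l) = pvScan l := by
  intro n
  induction n with
  | zero =>
    intro l hl
    have : l = [] := by cases l with | nil => rfl | cons a t => simp at hl
    subst this
    simp [pvSplit, pvTailFlat, pvScan]
  | succ n ih =>
    intro l hl
    cases l with
    | nil => simp [pvSplit, pvTailFlat, pvScan]
    | cons c rest =>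
      by_cases hp : pvSeeSep.isPrefixOf (c :: rest) = true
      · have hsplit : pvSplit pvSeeSep [] (c :: rest) =
            [] :: pvSplit pvSeeSep [] (rest.drop 4) := by
          simp [pvSplit, hp, show pvSeeSep.length - 1 = 4 from rfl]
        have hscan : pvScan (c :: rest) =
            pvScan ((rest.drop 4).dropWhile (fun d => d ≠ ' ')) := by
          rw [pvScan]; simp [hp]
        set m := rest.drop 4 with hm
        set w := m.takeWhile (fun d => d ≠ ' ') with hwdef
        set m' := m.dropWhile (fun d => d ≠ ' ') with hm'def
        have hmw : w ++ m' = m := List.takeWhile_append_dropWhile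
        have hw : ∀ c ∈ w, ¬ (c = ' ') := by
          intro x hx
          have := List.mem_takeWhile_imp hx
          simpa using this
        have hm'n : m' = [] ∨ ∃ t', m' = ' ' :: t' := by
          cases hcm : m' with
          | nil => exact Or.inl rfl
          | cons d t' =>
            right
            refine ⟨t', ?_⟩
            have hdw : m.dropWhile (fun d => decide (d ≠ ' ')) = d :: t' :=
              hm'def.symm.trans hcm
            have hd : d = ' ' := by simpa using pvDropWhile_head_false hdw
            rw [hd]
        have hT : pvSplit pvSeeSep [] m =
            (w ++ (pvSplit pvSeeSep [] m').headD []) :: (pvSplit pvSeeSep [] m').drop 1 := by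
          rw [← hmw, pvAbsorb w hw [] m', List.nil_append, pvSplit_cur pvSeeSep [] m' w]
        have hlen' : m'.length ≤ n := by
          have h1 : m'.length ≤ m.length := by rw [hm'def]; exact List.length_dropWhile_le _ _
          have h2 : m.length ≤ rest.length := by rw [hm]; simp
          have h3 : rest.length ≤ n := by simpa using hl
          omega
        have ihm := ih m' hlen'
        rw [hscan, ← ihm]
        rw [hsplit, hT]
        unfold pvTailFlat
        simp only [List.headD_cons, List.drop_one, List.tail_cons, List.nil_append,
          List.flatMap_cons]
        rw [pvDw_head w m' hw hm'n]
      · have hsplit : pvSplit pvSeeSep [] (c :: rest) = pvSplit pvSeeSep [c] rest := by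
          simp [pvSplit, hp]
        have hscan : pvScan (c :: rest) = c :: pvScan rest := by
          rw [pvScan]; simp [hp]
        have ihr := ih rest (by simpa using hl)
        rw [hscan, ← ihr, hsplit, pvSplit_cur pvSeeSep [] rest [c]]
        unfold pvTailFlat
        rw [pvSplit_cur pvSeeSep [] rest []] -- no-op shape; keep heads aligned
        simp

-- ===== VERDICT (by name: the statement is the Claim_ definition above) =====
theorem supress_cross_references_spec : Claim_equal_supress_cross_references := by
  unfold Claim_equal_supress_cross_references
  intro s _
  unfold Spec_supress_cross_references
  unfold supress_cross_references supress_cross_references_alt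
  have hsep : (pvSeeSep : List Char) ≠ [] := by decide
  rw [pvSplitOn_eq pvSeeSep hsep s.toList]
  have hmain := pvMain s.toList.length s.toList (le_refl _)
  by_cases h1 : (pvSplit pvSeeSep [] s.toList).length = 1
  · rw [if_pos h1]
    obtain ⟨x, hx⟩ := List.length_eq_one_iff.mp h1
    have hjoin := pvJoin_pvSplit pvSeeSep hsep [] s.toList ([] : List Char)
    rw [hx] at hjoin hmain
    have hxl : x = s.toList := by
      simpa [PySem.Chars.join, List.intercalate] using hjoin
    have : pvScan s.toList = s.toList := by
      rw [← hmain]; simp [pvTailFlat, hxl]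
    rw [this, String.ofList_toList]
  · rw [if_neg h1]
    congr 1
    have hstep : (fun (new_string : List Char) (s' : List Char) =>
        if 1 < (PySem.Chars.splitOn s' [' ']).length then
          new_string ++ [' '] ++ PySem.Chars.join [' '] ((PySem.Chars.splitOn s' [' ']).drop 1)
        else new_string) =
        (fun (acc : List Char) (p : List Char) => acc ++
          (if 1 < (PySem.Chars.splitOn p [' ']).length then
            ' ' :: PySem.Chars.join [' '] ((PySem.Chars.splitOn p [' ']).drop 1)
          else [])) := by
      funext acc p
      by_cases hc : 1 < (PySem.Chars.splitOn p [' ']).length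
      · simp [hc]
      · simp [hc]
    rw [hstep, PySem.List.foldl_append_eq_flatMap]
    have hg : (fun (p : List Char) =>
        if 1 < (PySem.Chars.splitOn p [' ']).length then
          ' ' :: PySem.Chars.join [' '] ((PySem.Chars.splitOn p [' ']).drop 1)
        else []) = List.dropWhile (fun d => d ≠ ' ') := by
      funext p
      rw [pvSplitOn_eq [' '] (by decide) p]
      exact pvInner p [] []
    rw [hg, ← hmain]
    unfold pvTailFlat
    rfl
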